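-- pv_equiv track=rewrite | github.com/KuchishkinM/algorithms-templates | python/sprint_11_task_B.py | score_caliculate
-- ===== SOURCE A (Python) =====
-- def score_caliculate(k, matrix) -> int:
--     only_digits = []
--     values_of_digits = []
--     for i in matrix:
--         for j in i:
--             if j != '.':
--                 only_digits.append(j)
--                 if j not in values_of_digits:
--                     values_of_digits.append(j)
--     counter = 0
--     for i in values_of_digits:
--         if only_digits.count(i) <= k * 2:
--             counter += 1
--     return counter
-- ===== SOURCE B (Python) =====
-- def score_caliculate(k, matrix) -> int:
--     chars = sorted(ch for row in matrix for ch in row if ch != '.')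
--     total = 0
--     i = 0
--     n = len(chars)
--     while i < n:
--         j = i + 1
--         while j < n and chars[j] == chars[i]:
--             j += 1
--         if j - i <= 2 * k:
--             total += 1
--         i = j
--     return total
-- ===== Notes on version B (the rewrite author's own statement) =====
-- stated objective: alternative
-- what changed: Replaces A's distinct-list membership scans and per-symbol only_digits.count rescans with sort-then-group: flatten the non-'.' characters, sort them once, and count runs of length <= 2k in a single run-length pass.
import Mathlib
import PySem

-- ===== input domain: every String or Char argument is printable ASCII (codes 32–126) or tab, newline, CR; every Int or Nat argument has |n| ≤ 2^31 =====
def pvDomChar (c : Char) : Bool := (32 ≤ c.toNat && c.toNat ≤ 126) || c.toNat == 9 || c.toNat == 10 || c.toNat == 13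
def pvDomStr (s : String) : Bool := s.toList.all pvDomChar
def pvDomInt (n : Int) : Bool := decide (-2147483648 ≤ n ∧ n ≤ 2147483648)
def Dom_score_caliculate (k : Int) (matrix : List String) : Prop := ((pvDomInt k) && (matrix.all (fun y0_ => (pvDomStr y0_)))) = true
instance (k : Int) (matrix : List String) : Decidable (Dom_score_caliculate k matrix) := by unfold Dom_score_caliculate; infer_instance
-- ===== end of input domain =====

-- B replaces A's distinct-list membership scans and per-symbol count rescans with
-- sort-then-group: sort the flattened non-'.' characters once and count runs of
-- length ≤ 2k in one run-length pass (objective: alternative).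

-- ===== PORT A =====
def score_caliculate (k : Int) (matrix : List String) : Int :=
  let st := matrix.foldl (fun st i =>
    i.toList.foldl (fun (st : List Char × List Char) j =>
      if j ≠ '.' then
        (st.1 ++ [j], if j ∈ st.2 then st.2 else st.2 ++ [j])
      else st) st) ([], [])
  st.2.foldl (fun counter i =>
    if (st.1.count i : Int) ≤ k * 2 then counter + 1 else counter) 0

-- ===== PORT B =====
-- the inner while loop "advance j past the run of chars[i]" is the takeWhile;
-- the outer while loop resumes at the rest of the list (the dropWhile)
def runPass (k : Int) : List Char → Int
  | [] => 0
  | c :: cs =>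
    let run := cs.takeWhile (· == c)
    let rest := cs.dropWhile (· == c)
    (if ((run.length : Int) + 1) ≤ 2 * k then 1 else 0) + runPass k rest
  termination_by l => l.length
  decreasing_by
    simp only [List.length_cons]
    exact Nat.lt_succ_of_le (List.length_dropWhile_le _ _)

def score_caliculate_alt (k : Int) (matrix : List String) : Int :=
  let chars := PySem.List.sorted
    (matrix.flatMap (fun row => row.toList.filter (fun ch => ch ≠ '.')))
    (fun x => x) false
  runPass k chars

-- ===== PRECONDITION & SPEC =====
def Spec_score_caliculate (k : Int) (matrix : List String) (out : Int) : Prop := out = score_caliculate_alt k matrix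
instance (k : Int) (matrix : List String) (out : Int) : Decidable (Spec_score_caliculate k matrix out) := by unfold Spec_score_caliculate; infer_instance

-- ===== CLAIM (what is proved, stated in full; the proofs are below) =====
def Claim_equal_score_caliculate : Prop := ∀ (k : Int) (matrix : List String), Dom_score_caliculate k matrix → Spec_score_caliculate k matrix (score_caliculate k matrix)

-- ===== LEMMAS AND PROOFS =====

-- a nested for-loop over the rows is a fold over the flattened character list
theorem foldl_rows {σ : Type} (f : σ → Char → σ) (matrix : List String) (init : σ) :
    matrix.foldl (fun st i => i.toList.foldl f st) init
      = (matrix.flatMap String.toList).foldl f init := by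
  induction matrix generalizing init with
  | nil => rfl
  | cons s rest ih => simp [List.flatMap_cons, List.foldl_append, ih]

-- A's accumulating pair over the filtered character list
theorem A_pair_fold (l : List Char) (p : List Char × List Char) :
    l.foldl (fun (st : List Char × List Char) j =>
        (st.1 ++ [j], if j ∈ st.2 then st.2 else st.2 ++ [j])) p
      = (p.1 ++ l, PySem.Set.update p.2 l) := by
  induction l generalizing p with
  | nil => simp [PySem.Set.update]
  | cons x xs ih =>
      simp [List.foldl_cons, ih, PySem.Set.update_cons, PySem.Set.add_eq_ite]

-- head of a dropWhile fails the predicate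
theorem dropWhile_head_false {A : Type} (p : A → Bool) :
    ∀ (l : List A) (h : A) (t : List A), l.dropWhile p = h :: t → p h = false := by
  intro l
  induction l with
  | nil => intro h t hf; cases hf
  | cons a as ih =>
    intro h t hf
    by_cases hp : p a = true
    · rw [List.dropWhile_cons_of_pos hp] at hf
      exact ih h t hf
    · rw [List.dropWhile_cons_of_neg hp] at hf
      cases hf
      simpa using hp

-- counting fold = countP
theorem foldl_count_le (m : Int) (cnt : Char → Nat) (l : List Char) (acc : Int) :
    l.foldl (fun c i => if (cnt i : Int) ≤ m then c + 1 else c) acc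
      = acc + (l.countP (fun i => decide ((cnt i : Int) ≤ m)) : Int) := by
  induction l generalizing acc with
  | nil => simp
  | cons x xs ih =>
      by_cases h : (cnt x : Int) ≤ m <;> simp [List.foldl_cons, ih, h] <;> ring

-- one unfolding of the run-length pass
theorem runPass_cons (k : Int) (c : Char) (cs : List Char) :
    runPass k (c :: cs)
      = (if (((cs.takeWhile (· == c)).length : Int) + 1) ≤ 2 * k then 1 else 0)
          + runPass k (cs.dropWhile (· == c)) := by
  rw [runPass]

-- countP agrees on any two Nodup lists with the same members
theorem countP_nodup_mem_congr (u v : List Char) (hu : u.Nodup) (hv : v.Nodup)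
    (h : ∀ x, x ∈ u ↔ x ∈ v) (p : Char → Bool) : u.countP p = v.countP p :=
  ((List.perm_ext_iff_of_nodup hu hv).mpr h).countP_eq p

-- the run-length pass over a sorted list counts exactly the distinct symbols
-- whose total count is ≤ 2k
theorem runPass_eq_aux (k : Int) (n : Nat) : ∀ S : List Char, S.length ≤ n → S.Pairwise (· ≤ ·) →
    runPass k S = (S.dedup.countP (fun c => decide ((S.count c : Int) ≤ 2 * k)) : Int) := by
  induction n with
  | zero =>
    intro S hlen _
    have : S = [] := List.eq_nil_of_length_eq_zero (Nat.le_zero.mp hlen)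
    subst this; simp [runPass]
  | succ n ih =>
    intro S hlen hS
    cases S with
    | nil => simp [runPass]
    | cons c cs =>
      set run := cs.takeWhile (· == c) with hrun
      set rest := cs.dropWhile (· == c) with hrest
      have hsplit : run ++ rest = cs := by
        rw [hrun, hrest]; exact List.takeWhile_append_dropWhile
      rcases List.pairwise_cons.mp hS with ⟨hc, hcs⟩
      have hrest_sub : rest.Sublist cs := hrest ▸ List.dropWhile_sublist _
      have hrest_pw : rest.Pairwise (· ≤ ·) := hcs.sublist hrest_sub
      have hrest_len : rest.length ≤ n := by
        have h1 : rest.length ≤ cs.length := hrest ▸ List.length_dropWhile_le _ _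
        have h2 : cs.length + 1 ≤ n + 1 := by simpa using hlen
        omega
      -- every element of run is c
      have hall : ∀ x ∈ run, x = c := by
        intro x hx
        have := List.mem_takeWhile_imp (hrun ▸ hx)
        exact eq_of_beq this
      -- every element of rest is > c
      have hgt : ∀ x ∈ rest, c < x := by
        intro x hx
        cases hr : rest with
        | nil => rw [hr] at hx; cases hx
        | cons h t =>
          have hdw : cs.dropWhile (fun x => x == c) = h :: t := by rw [← hrest]; exact hr
          have hhne : (h == c) = false := dropWhile_head_false _ cs h t hdw
          have hne : h ≠ c := by simpa using hhne
          have hch : c < h := lt_of_le_of_ne (hc h (hrest_sub.mem (hr ▸ List.mem_cons_self))) (Ne.symm hne)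
          rw [hr] at hx
          rcases List.mem_cons.mp hx with rfl | hxt
          · exact hch
          · have : h ≤ x := (List.pairwise_cons.mp (hr ▸ hrest_pw)).1 x hxt
            exact lt_of_lt_of_le hch this
      have hcnotin : c ∉ rest := fun h => lt_irrefl c (hgt c h)
      -- counts in S
      have hcount_c : (c :: cs).count c = run.length + 1 := by
        rw [← hsplit, List.count_cons_self, List.count_append,
          List.count_eq_zero.mpr hcnotin,
          List.count_eq_length.mpr (fun b hb => ((hall b hb).symm : c = b))]
      have hcount_rest : ∀ x ∈ rest, (c :: cs).count x = rest.count x := by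
        intro x hx
        have hxne : x ≠ c := fun h => (lt_irrefl c (h ▸ hgt x hx))
        rw [← hsplit, List.count_cons_of_ne hxne.symm, List.count_append,
          List.count_eq_zero.mpr (fun hmem => hxne (hall x hmem))]
        omega
      -- dedup of S has the same members as c :: rest.dedup
      have hmem : ∀ x, x ∈ (c :: cs).dedup ↔ x ∈ c :: rest.dedup := by
        intro x
        simp only [List.mem_dedup, List.mem_cons, ← hsplit, List.mem_append]
        constructor
        · rintro (rfl | hr | hr)
          · exact Or.inl rfl
          · exact Or.inl (hall x hr)
          · exact Or.inr hr
        · rintro (rfl | hr)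
          · exact Or.inl rfl
          · exact Or.inr (Or.inr hr)
      have hnodup2 : (c :: rest.dedup).Nodup :=
        List.nodup_cons.mpr ⟨fun h => hcnotin (List.mem_dedup.mp h), List.nodup_dedup rest⟩
      have hcongr := countP_nodup_mem_congr _ _ (List.nodup_dedup (c :: cs)) hnodup2 hmem
        (fun x => decide (((c :: cs).count x : Int) ≤ 2 * k))
      rw [runPass_cons, ← hrun, ← hrest]
      rw [ih rest hrest_len hrest_pw]
      rw [hcongr, List.countP_cons]
      have hpc : (decide (((c :: cs).count c : Int) ≤ 2 * k))
          = decide (((run.length : Int) + 1) ≤ 2 * k) := by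
        rw [hcount_c]; push_cast; rfl
      have hcongr2 : rest.dedup.countP (fun x => decide (((c :: cs).count x : Int) ≤ 2 * k))
          = rest.dedup.countP (fun x => decide ((rest.count x : Int) ≤ 2 * k)) := by
        apply List.countP_congr
        intro x hx
        rw [hcount_rest x (List.mem_dedup.mp hx)]
      rw [hcongr2, hpc]
      by_cases h : ((run.length : Int) + 1) ≤ 2 * k <;> simp [h] <;> push_cast <;> ring

theorem runPass_eq (k : Int) (S : List Char) (hS : S.Pairwise (· ≤ ·)) :
    runPass k S = (S.dedup.countP (fun c => decide ((S.count c : Int) ≤ 2 * k)) : Int) :=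
  runPass_eq_aux k S.length S le_rfl hS

theorem score_caliculate_eq (k : Int) (matrix : List String) :
    score_caliculate k matrix = score_caliculate_alt k matrix := by
  unfold score_caliculate score_caliculate_alt
  rw [foldl_rows]
  set L := matrix.flatMap String.toList with hL
  have hf1 : (fun (st : List Char × List Char) j =>
        if j ≠ '.' then (st.1 ++ [j], if j ∈ st.2 then st.2 else st.2 ++ [j]) else st)
      = (fun st j => if (fun c => !(c == '.')) j = true then
          (st.1 ++ [j], if j ∈ st.2 then st.2 else st.2 ++ [j]) else st) := by
    funext st j; by_cases h : j = '.' <;> simp [h]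
  rw [hf1, ← List.foldl_filter]
  have hD : L.filter (fun c => !(c == '.'))
      = matrix.flatMap (fun row => row.toList.filter (fun ch => ch ≠ '.')) := by
    have hfun : (fun c : Char => !(c == '.')) = (fun ch : Char => decide (ch ≠ '.')) := by
      funext c; by_cases h : c = '.' <;> simp [h]
    rw [hL, List.filter_flatMap, hfun]
  set D := matrix.flatMap (fun row => row.toList.filter (fun ch => ch ≠ '.')) with hDdef
  rw [hD, A_pair_fold]
  simp only [List.nil_append]
  have hupd : PySem.Set.update ([] : List Char) D = PySem.Set.ofList D :=
    PySem.Set.update_nil_left D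
  rw [hupd]
  refine Eq.trans (foldl_count_le (k * 2) (fun i => D.count i) (PySem.Set.ofList D) 0) ?_
  set S := PySem.List.sorted D (fun x => x) false with hSdef
  have hperm : S.Perm D := PySem.List.sorted_perm D (fun x => x) false
  have hpw : S.Pairwise (· ≤ ·) := by
    have := PySem.List.sorted_pairwise (xs := D) (key := fun x : Char => x)
    simpa using this
  rw [runPass_eq k S hpw]
  have hcnt : ∀ x, S.count x = D.count x := fun x => hperm.count_eq x
  have h1 : S.dedup.countP (fun c => decide ((S.count c : Int) ≤ 2 * k))
      = S.dedup.countP (fun c => decide ((D.count c : Int) ≤ k * 2)) := by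
    apply List.countP_congr
    intro x _
    rw [hcnt x, mul_comm]
  have h2 : S.dedup.countP (fun c => decide ((D.count c : Int) ≤ k * 2))
      = (PySem.Set.ofList D).countP (fun c => decide ((D.count c : Int) ≤ k * 2)) := by
    apply countP_nodup_mem_congr _ _ (List.nodup_dedup S) (PySem.Set.nodup_ofList D)
    intro x
    rw [List.mem_dedup, PySem.Set.mem_ofList]
    exact ⟨fun h => hperm.mem_iff.mp h, fun h => hperm.mem_iff.mpr h⟩
  rw [h1, h2]
  simp

-- ===== VERDICT (by name: the statement is the Claim_ definition above) =====
theorem score_caliculate_spec : Claim_equal_score_caliculate := by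
  intro k matrix _
  unfold Spec_score_caliculate
  exact score_caliculate_eq k matrix
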